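-- pv_equiv track=rewrite | github.com/Parkhb1106/Telco-RAG | Telco-RAG_api/src/get_definitions.py | find_and_filter_terms
-- ===== SOURCE A (Python) =====
-- def preprocess(text, lowercase=True):
--     """Converts text to lowercase and removes punctuation."""
--     if lowercase:
--         text = text.lower()
--     punctuations = '''!()-[]{};:'"\,<>./?@#$%^&*_~'''
--     for char in punctuations:
--         text = text.replace(char, '')
--     return text
--
-- def find_and_filter_terms(terms_dict, sentence):
--     """Finds terms in the given sentence, case-insensitively, and filters out shorter overlapping terms."""
--     lowercase_sentence = preprocess(sentence, lowercase=True)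
--
--     matched_terms = {term: terms_dict[term] for term in terms_dict if preprocess(term) in lowercase_sentence}
--
--     final_terms = {}
--     for term in matched_terms:
--         if not any(term in other and term != other for other in matched_terms):
--             final_terms[term] = matched_terms[term]
--
--     return final_terms
-- ===== SOURCE B (Python) =====
-- def preprocess(text, lowercase=True):
--     """Converts text to lowercase and removes punctuation."""
--     if lowercase:
--         text = text.lower()
--     punctuations = '''!()-[]{};:'"\,<>./?@#$%^&*_~'''
--     for char in punctuations:
--         text = text.replace(char, '')
--     return text
--
-- def find_and_filter_terms(terms_dict, sentence):
--     """Finds terms in the given sentence, case-insensitively, and filters out shorter overlapping terms."""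
--     lowercase_sentence = preprocess(sentence, lowercase=True)
--
--     matched_terms = {term: terms_dict[term] for term in terms_dict if preprocess(term) in lowercase_sentence}
--
--     # Filter phase: scan the matched terms from longest to shortest; a term is
--     # dropped as soon as it is a proper substring of a longer term seen earlier.
--     ordered = sorted(matched_terms, key=len, reverse=True)
--     dropped = set()
--     seen = []
--     for term in ordered:
--         if any(term in other and term != other for other in seen):
--             dropped.add(term)
--         seen.append(term)
--
--     return {term: value for term, value in matched_terms.items() if term not in dropped}
-- ===== Notes on version B (the rewrite author's own statement) =====
-- stated objective: alternative
-- what changed: The filtering phase is decomposed differently: instead of testing every matched term against every other matched term, B sorts the matched terms by length descending and marks a term dropped when it is a proper substring of a longer term already seen, then rebuilds the result in original insertion order from the dropped set.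
import Mathlib
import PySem

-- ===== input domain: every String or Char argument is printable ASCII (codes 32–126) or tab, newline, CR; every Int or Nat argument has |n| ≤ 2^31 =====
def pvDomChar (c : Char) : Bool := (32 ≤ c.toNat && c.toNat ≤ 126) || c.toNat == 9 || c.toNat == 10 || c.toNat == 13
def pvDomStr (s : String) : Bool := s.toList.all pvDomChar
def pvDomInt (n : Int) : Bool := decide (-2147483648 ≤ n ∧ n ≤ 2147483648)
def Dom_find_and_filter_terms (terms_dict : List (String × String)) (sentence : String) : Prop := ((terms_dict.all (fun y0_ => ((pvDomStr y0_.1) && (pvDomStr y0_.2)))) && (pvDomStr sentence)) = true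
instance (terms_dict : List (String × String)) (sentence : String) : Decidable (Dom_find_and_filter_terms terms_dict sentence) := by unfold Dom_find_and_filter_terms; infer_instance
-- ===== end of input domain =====

-- B replaces the all-pairs overlap filter by a longest-first scan with a dropped-set: an alternative decomposition of the filtering phase (same result, similar cost).


-- ===== PORT A =====
-- shared module helper: preprocess(text, lowercase) — lowercase then strip punctuation
def pvPunct : List Char := ['!', '(', ')', '-', '[', ']', '{', '}', ';', ':', '\'', '"', '\\', ',', '<', '>', '.', '/', '?', '@', '#', '$', '%', '^', '&', '*', '_', '~']

def pvPreprocess (text : String) (lowercase : Bool) : String :=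
  pvPunct.foldl (fun t c => PySem.Str.replace t (String.ofList [c]) "")
    (if lowercase then PySem.Str.lower text else text)

def find_and_filter_terms (terms_dict : List (String × String)) (sentence : String) : List (String × String) :=
  let lowercase_sentence := pvPreprocess sentence true
  let matched_terms := terms_dict.filter (fun p => PySem.Str.isIn (pvPreprocess p.1 true) lowercase_sentence)
  matched_terms.filter (fun p => !(matched_terms.any (fun q => PySem.Str.isIn p.1 q.1 && p.1 != q.1)))

-- ===== PORT B =====
-- the loop body of B's longest-first scan: state = (dropped set, seen list)
def pvStep (st : PySem.Set String × List String) (t : String) : PySem.Set String × List String :=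
  (if st.2.any (fun o => PySem.Str.isIn t o && t != o) then PySem.Set.add st.1 t else st.1,
   st.2 ++ [t])

def find_and_filter_terms_alt (terms_dict : List (String × String)) (sentence : String) : List (String × String) :=
  let lowercase_sentence := pvPreprocess sentence true
  let matched_terms := terms_dict.filter (fun p => PySem.Str.isIn (pvPreprocess p.1 true) lowercase_sentence)
  let ordered := PySem.List.sorted (matched_terms.map Prod.fst) PySem.Str.len true
  let dropped := (ordered.foldl pvStep (PySem.Set.empty, [])).1
  matched_terms.filter (fun p => !(PySem.Set.contains dropped p.1))

-- ===== PRECONDITION & SPEC =====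
def Spec_find_and_filter_terms (terms_dict : List (String × String)) (sentence : String) (out : List (String × String)) : Prop := out = find_and_filter_terms_alt terms_dict sentence
instance (terms_dict : List (String × String)) (sentence : String) (out : List (String × String)) : Decidable (Spec_find_and_filter_terms terms_dict sentence out) := by unfold Spec_find_and_filter_terms; infer_instance

-- ===== CLAIM (what is proved, stated in full; the proofs are below) =====
def Claim_equal_find_and_filter_terms : Prop := ∀ (terms_dict : List (String × String)) (sentence : String), Dom_find_and_filter_terms terms_dict sentence → Spec_find_and_filter_terms terms_dict sentence (find_and_filter_terms terms_dict sentence)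

-- ===== LEMMAS AND PROOFS =====

theorem pv_fold_mem (L : List String) (d s : List String) (x : String) :
    x ∈ (L.foldl pvStep (d, s)).1 ↔
      x ∈ d ∨ ∃ u v, L = u ++ x :: v ∧ (s ++ u).any (fun o => PySem.Str.isIn x o && x != o) = true := by
  induction L generalizing d s with
  | nil => simp
  | cons t L ih =>
    rw [List.foldl_cons]
    have hstep : pvStep (d, s) t =
        (if s.any (fun o => PySem.Str.isIn t o && t != o) then PySem.Set.add d t else d, s ++ [t]) := rfl
    rw [hstep]
    by_cases hc : s.any (fun o => PySem.Str.isIn t o && t != o) = true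
    · rw [if_pos hc, ih]
      constructor
      · rintro (hd | ⟨u, v, hL, ha⟩)
        · rcases (PySem.Set.mem_add d t x).mp hd with hd | rfl
          · exact Or.inl hd
          · exact Or.inr ⟨[], L, by simp, by simpa using hc⟩
        · exact Or.inr ⟨t :: u, v, by simp [hL], by simpa [List.any_append, List.any_cons, Bool.or_assoc] using ha⟩
      · rintro (hd | ⟨u, v, hL, ha⟩)
        · exact Or.inl ((PySem.Set.mem_add d t x).mpr (Or.inl hd))
        · cases u with
          | nil =>
            obtain ⟨rfl, rfl⟩ : t = x ∧ L = v := by simpa using hL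
            exact Or.inl ((PySem.Set.mem_add d t t).mpr (Or.inr rfl))
          | cons t' u' =>
            obtain ⟨rfl, hL'⟩ : t = t' ∧ L = u' ++ x :: v := by simpa using hL
            exact Or.inr ⟨u', v, hL', by simpa [List.any_append, List.any_cons, Bool.or_assoc] using ha⟩
    · rw [if_neg hc, ih]
      constructor
      · rintro (hd | ⟨u, v, hL, ha⟩)
        · exact Or.inl hd
        · exact Or.inr ⟨t :: u, v, by simp [hL], by simpa [List.any_append, List.any_cons, Bool.or_assoc] using ha⟩
      · rintro (hd | ⟨u, v, hL, ha⟩)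
        · exact Or.inl hd
        · cases u with
          | nil =>
            obtain ⟨rfl, rfl⟩ : t = x ∧ L = v := by simpa using hL
            exact absurd (by simpa using ha) hc
          | cons t' u' =>
            obtain ⟨rfl, hL'⟩ : t = t' ∧ L = u' ++ x :: v := by simpa using hL
            exact Or.inr ⟨u', v, hL', by simpa [List.any_append, List.any_cons, Bool.or_assoc] using ha⟩

theorem pv_dropped_eq (M : List (String × String)) (x : String)
    (hx : x ∈ M.map Prod.fst) :
    PySem.Set.contains (((PySem.List.sorted (M.map Prod.fst) PySem.Str.len true).foldl pvStep (PySem.Set.empty, [])).1) x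
      = (M.map Prod.fst).any (fun o => PySem.Str.isIn x o && x != o) := by
  have hcls : ∀ (t o : String), (PySem.Str.isIn t o && t != o) = true → PySem.Str.len t < PySem.Str.len o := by
    intro t o h
    simp only [Bool.and_eq_true, bne_iff_ne, ne_eq] at h
    obtain ⟨h1, h2⟩ := h
    have hinf : t.toList <:+: o.toList := (PySem.Str.isIn_iff_infix t o).mp h1
    have hne : t.toList ≠ o.toList := fun he => h2 (String.toList_inj.mp he)
    have hlt : t.toList.length < o.toList.length := by
      rcases Nat.lt_or_ge t.toList.length o.toList.length with hlt | hge
      · exact hlt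
      · exact absurd (hinf.sublist.eq_of_length_le hge) hne
    simp only [PySem.Str.len_eq]
    exact_mod_cast hlt
  set keys := M.map Prod.fst with hkeys
  set ordered := PySem.List.sorted keys PySem.Str.len true with hord
  have hmem : ∀ y, y ∈ ordered ↔ y ∈ keys := fun y => PySem.List.mem_sorted keys PySem.Str.len true y
  have hpw : ordered.Pairwise (fun a b => PySem.Str.len b ≤ PySem.Str.len a) :=
    PySem.List.sorted_pairwise_rev keys PySem.Str.len
  rw [Bool.eq_iff_iff]
  have hciff : ∀ (s : PySem.Set String) (y : String), PySem.Set.contains s y = true ↔ y ∈ s := by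
    intro s y; simp [PySem.Set.contains]
  rw [hciff, pv_fold_mem, List.any_eq_true]
  constructor
  · rintro (he | ⟨u, v, hL, ha⟩)
    · simp [PySem.Set.empty] at he
    · simp only [List.nil_append] at ha
      obtain ⟨o, ho, hco⟩ := List.any_eq_true.mp ha
      have hok : o ∈ keys := (hmem o).mp (by rw [hL]; exact List.mem_append_left _ ho)
      exact ⟨o, hok, hco⟩
  · rintro ⟨o, ho, hco⟩
    have hxo : x ∈ ordered := (hmem x).mpr hx
    obtain ⟨u, v, hsplit⟩ := List.append_of_mem hxo
    refine Or.inr ⟨u, v, hsplit, ?_⟩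
    simp only [List.nil_append]
    refine List.any_eq_true.mpr ⟨o, ?_, hco⟩
    have hoord : o ∈ ordered := (hmem o).mpr ho
    rw [hsplit] at hoord
    rcases List.mem_append.mp hoord with h1 | h2
    · exact h1
    · exfalso
      rcases List.mem_cons.mp h2 with rfl | h3
      · simp at hco
      · have hpw' : (u ++ x :: v).Pairwise (fun a b => PySem.Str.len b ≤ PySem.Str.len a) := hsplit ▸ hpw
        have hxv := (List.pairwise_cons.mp (List.pairwise_append.mp hpw').2.1).1 o h3
        exact absurd hxv (not_le.mpr (hcls x o hco))

-- ===== VERDICT (by name: the statement is the Claim_ definition above) =====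
theorem find_and_filter_terms_spec : Claim_equal_find_and_filter_terms := by
  intro terms_dict sentence _
  unfold Spec_find_and_filter_terms find_and_filter_terms find_and_filter_terms_alt
  dsimp only
  apply List.filter_congr
  intro p hp
  congr 1
  rw [pv_dropped_eq _ _ (List.mem_map_of_mem hp), List.any_map]
  rfl
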